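-- pv_equiv track=rewrite | github.com/tardis-pro/maps.tardis.digital | backend/api/app/core/rate_limit.py | get_rate_limit_for_path
-- ===== SOURCE A (Python) =====
-- class RateLimits:
--     """
--     Pre-defined rate limits for different endpoint categories.
--
--     These limits are designed to:
--     - Allow normal usage patterns
--     - Prevent abuse and DoS attacks
--     - Protect sensitive endpoints with stricter limits
--     """
--
--     # Default limits for most endpoints
--     DEFAULT = "200/minute"
--
--     # Anonymous users get stricter limits
--     ANON = "100/minute"
--
--     # Authenticated users get more generous limits
--     AUTHENTICATED = "1000/minute"
--
--     # Sensitive endpoints (auth, data upload) get strict limits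
--     SENSITIVE = "10/minute"
--
--     # Read-heavy endpoints can have higher limits
--     READ_ONLY = "500/minute"
--
--     # Write operations get moderate limits
--     WRITE = "100/minute"
--
--     # Health check endpoints - very permissive
--     HEALTH = "1000/minute"
--
--     # File upload endpoints - very strict
--     UPLOAD = "5/minute"
--
-- ENDPOINT_CATEGORIES = {
--     # Health and status endpoints
--     "/health": RateLimits.HEALTH,
--     "/ready": RateLimits.HEALTH,
--
--     # Authentication endpoints - most restrictive
--     "/api/v1/auth/login": RateLimits.SENSITIVE,
--     "/api/v1/auth/register": RateLimits.SENSITIVE,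
--     "/api/v1/auth/reset-password": RateLimits.SENSITIVE,
--
--     # User management
--     "/api/v1/users": RateLimits.WRITE,
--     "/api/v1/user-profile": RateLimits.AUTHENTICATED,
--
--     # Data endpoints
--     "/api/v1/sources": RateLimits.READ_ONLY,
--     "/api/v1/layers": RateLimits.READ_ONLY,
--     "/api/v1/projects": RateLimits.READ_ONLY,
--     "/api/v1/geometry": RateLimits.READ_ONLY,
--
--     # ETL endpoints
--     "/tasks/": RateLimits.UPLOAD,
-- }
--
-- def get_rate_limit_for_path(path: str, method: str = "GET") -> str:
--     """
--     Determine the appropriate rate limit for a given endpoint.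
--
--     Args:
--         path: The API endpoint path
--         method: HTTP method (GET, POST, PUT, DELETE, etc.)
--
--     Returns:
--         Rate limit string (e.g., "100/minute")
--     """
--     # Check for exact match
--     if path in ENDPOINT_CATEGORIES:
--         return ENDPOINT_CATEGORIES[path]
--
--     # Check for prefix match (more specific first)
--     for prefix, limit in sorted(ENDPOINT_CATEGORIES.items(), key=lambda x: -len(x[0])):
--         if path.startswith(prefix):
--             return limit
--
--     # Apply method-based limits for write operations
--     if method in ("POST", "PUT", "PATCH", "DELETE"):
--         return RateLimits.WRITE
--
--     # Default to authenticated limit for known users, anon for others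
--     return RateLimits.DEFAULT
-- ===== SOURCE B (Python) =====
-- class RateLimits:
--     DEFAULT = "200/minute"
--     ANON = "100/minute"
--     AUTHENTICATED = "1000/minute"
--     SENSITIVE = "10/minute"
--     READ_ONLY = "500/minute"
--     WRITE = "100/minute"
--     HEALTH = "1000/minute"
--     UPLOAD = "5/minute"
--
-- ENDPOINT_CATEGORIES = {
--     "/health": RateLimits.HEALTH,
--     "/ready": RateLimits.HEALTH,
--     "/api/v1/auth/login": RateLimits.SENSITIVE,
--     "/api/v1/auth/register": RateLimits.SENSITIVE,
--     "/api/v1/auth/reset-password": RateLimits.SENSITIVE,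
--     "/api/v1/users": RateLimits.WRITE,
--     "/api/v1/user-profile": RateLimits.AUTHENTICATED,
--     "/api/v1/sources": RateLimits.READ_ONLY,
--     "/api/v1/layers": RateLimits.READ_ONLY,
--     "/api/v1/projects": RateLimits.READ_ONLY,
--     "/api/v1/geometry": RateLimits.READ_ONLY,
--     "/tasks/": RateLimits.UPLOAD,
-- }
--
-- def get_rate_limit_for_path(path: str, method: str = "GET") -> str:
--     # One pass: keep the longest matching prefix (strict '>' in insertion order
--     # reproduces the stable longest-first preference; an exact key is always
--     # the longest matching prefix of itself).
--     best_prefix = None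
--     best_limit = None
--     for prefix, limit in ENDPOINT_CATEGORIES.items():
--         if path.startswith(prefix) and (best_prefix is None or len(prefix) > len(best_prefix)):
--             best_prefix, best_limit = prefix, limit
--     if best_limit is not None:
--         return best_limit
--     if method in ("POST", "PUT", "PATCH", "DELETE"):
--         return RateLimits.WRITE
--     return RateLimits.DEFAULT
-- ===== Notes on version B (the rewrite author's own statement) =====
-- stated objective: simpler
-- what changed: Replaced A's separate exact-match dict lookup plus a per-call sorted-by-descending-length scan with a single insertion-order pass that keeps the longest (strictly) matching prefix, falling through to the same method-based defaults.
import Mathlib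
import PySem

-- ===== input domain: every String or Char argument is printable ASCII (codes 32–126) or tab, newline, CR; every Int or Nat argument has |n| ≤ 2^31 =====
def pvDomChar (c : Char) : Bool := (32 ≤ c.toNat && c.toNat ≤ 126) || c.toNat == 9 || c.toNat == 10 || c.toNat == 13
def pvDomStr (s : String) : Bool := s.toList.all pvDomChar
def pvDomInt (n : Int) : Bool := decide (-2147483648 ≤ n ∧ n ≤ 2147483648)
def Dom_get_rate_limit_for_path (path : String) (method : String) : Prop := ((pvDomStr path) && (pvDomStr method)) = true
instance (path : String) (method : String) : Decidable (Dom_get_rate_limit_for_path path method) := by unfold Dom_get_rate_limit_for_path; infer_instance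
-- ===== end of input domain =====

-- B replaces A's exact-match block and per-call sorted() with a single insertion-order pass
-- keeping the longest matching prefix (objective: simpler).


-- ===== PORT A =====
-- ENDPOINT_CATEGORIES with RateLimits constants substituted (module-level literals)
def pvItems : List (String × String) :=
  [("/health", "1000/minute"),
   ("/ready", "1000/minute"),
   ("/api/v1/auth/login", "10/minute"),
   ("/api/v1/auth/register", "10/minute"),
   ("/api/v1/auth/reset-password", "10/minute"),
   ("/api/v1/users", "100/minute"),
   ("/api/v1/user-profile", "1000/minute"),
   ("/api/v1/sources", "500/minute"),
   ("/api/v1/layers", "500/minute"),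
   ("/api/v1/projects", "500/minute"),
   ("/api/v1/geometry", "500/minute"),
   ("/tasks/", "5/minute")]

def pvENDPOINT_CATEGORIES : PySem.Dict String String := PySem.Dict.ofList pvItems

-- 'if path in ENDPOINT_CATEGORIES: return ENDPOINT_CATEGORIES[path]' ported as one
-- first-match lookup (exact: contains ↔ get?.isSome, and d[path] is get? when present).
-- The for-loop with early return over sorted(items, key=-len) is List.find?.
def get_rate_limit_for_path (path : String) (method : String) : String :=
  match pvENDPOINT_CATEGORIES.get? path with
  | some v => v
  | none =>
    match (PySem.List.sorted pvENDPOINT_CATEGORIES.items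
            (fun x => -(PySem.Str.len x.1))).find?
            (fun pl => PySem.Str.startswith path pl.1) with
    | some pl => pl.2
    | none =>
      if method = "POST" ∨ method = "PUT" ∨ method = "PATCH" ∨ method = "DELETE" then
        "100/minute"
      else
        "200/minute"

-- ===== PORT B =====
-- one pass over the items keeping the longest (strictly) matching prefix so far
def pvStep (path : String) (best : Option (String × String)) (pl : String × String) :
    Option (String × String) :=
  if PySem.Str.startswith path pl.1 &&
      (match best with
       | none => true
       | some bp => decide (PySem.Str.len pl.1 > PySem.Str.len bp.1)) then
    some pl
  else
    best

def get_rate_limit_for_path_alt (path : String) (method : String) : String :=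
  match pvENDPOINT_CATEGORIES.items.foldl (pvStep path) none with
  | some pl => pl.2
  | none =>
    if method = "POST" ∨ method = "PUT" ∨ method = "PATCH" ∨ method = "DELETE" then
      "100/minute"
    else
      "200/minute"

-- ===== PRECONDITION & SPEC =====
def Spec_get_rate_limit_for_path (path : String) (method : String) (out : String) : Prop := out = get_rate_limit_for_path_alt path method
instance (path : String) (method : String) (out : String) : Decidable (Spec_get_rate_limit_for_path path method out) := by unfold Spec_get_rate_limit_for_path; infer_instance

-- ===== CLAIM (what is proved, stated in full; the proofs are below) =====
def Claim_equal_get_rate_limit_for_path : Prop := ∀ (path : String) (method : String), Dom_get_rate_limit_for_path path method → Spec_get_rate_limit_for_path path method (get_rate_limit_for_path path method)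

-- ===== LEMMAS AND PROOFS =====

-- the match predicate both programs test
def pvM (path : String) (pl : String × String) : Bool := PySem.Str.startswith path pl.1

-- no two keys of ENDPOINT_CATEGORIES are prefixes of one another
lemma pv_pairwise : pvItems.Pairwise
    (fun p q => ¬ p.1.toList <+: q.1.toList ∧ ¬ q.1.toList <+: p.1.toList) := by decide

-- hence at most one key can match a given path
lemma pv_filter_le_one (path : String) : (pvItems.filter (pvM path)).length ≤ 1 := by
  have hpw := List.Pairwise.filter (l := pvItems) (pvM path) pv_pairwise
  cases hF : pvItems.filter (pvM path) with
  | nil => simp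
  | cons x t =>
    cases t with
    | nil => simp
    | cons y t' =>
      exfalso
      rw [hF] at hpw
      have hxy := (List.pairwise_cons.mp hpw).1 y (by simp)
      have hx : pvM path x = true := List.of_mem_filter (by rw [hF]; simp)
      have hy : pvM path y = true := List.of_mem_filter (l := pvItems) (by rw [hF]; simp)
      rw [pvM, PySem.Str.startswith_eq] at hx hy
      rcases List.prefix_or_prefix_of_prefix ((PySem.Chars.startswith_iff _ _).mp hx)
        ((PySem.Chars.startswith_iff _ _).mp hy) with h | h
      · exact hxy.1 h
      · exact hxy.2 h

-- a fold step over non-matching items is the identity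
lemma pv_fold_no_match (path : String) (L : List (String × String))
    (acc : Option (String × String)) (h : ∀ x ∈ L, pvM path x = false) :
    L.foldl (pvStep path) acc = acc := by
  induction L generalizing acc with
  | nil => rfl
  | cons x L ih =>
    have hx : PySem.Chars.startswith path.toList x.1.toList = false := by
      have := h x (by simp)
      rwa [pvM, PySem.Str.startswith_eq] at this
    have hstep : pvStep path acc x = acc := by simp [pvStep, hx]
    rw [List.foldl_cons, hstep]
    apply ih
    intro y hy
    exact h y (by simp [hy])

-- with at most one match, the fold returns the unique match (if any)
lemma pv_fold_eq (path : String) (L : List (String × String))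
    (h : (L.filter (pvM path)).length ≤ 1) :
    L.foldl (pvStep path) none = (L.filter (pvM path)).head? := by
  induction L with
  | nil => rfl
  | cons x L ih =>
    by_cases hx : pvM path x = true
    · have hf : (x :: L).filter (pvM path) = x :: L.filter (pvM path) := by
        simp [hx]
      rw [hf] at h ⊢
      rw [List.length_cons] at h
      have hnil : List.filter (pvM path) L = [] := List.length_eq_zero_iff.mp (by omega)
      have hall : ∀ y ∈ L, pvM path y = false := by
        intro y hy
        have := (List.filter_eq_nil_iff.mp hnil) y hy
        simpa using this
      have hxc : PySem.Chars.startswith path.toList x.1.toList = true := by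
        rwa [pvM, PySem.Str.startswith_eq] at hx
      have hstep : pvStep path none x = some x := by simp [pvStep, hxc]
      rw [List.foldl_cons, hstep, pv_fold_no_match path L (some x) hall]
      rfl
    · have hx' : pvM path x = false := by simpa using hx
      have hf : (x :: L).filter (pvM path) = L.filter (pvM path) := by
        simp [hx']
      have hxc : PySem.Chars.startswith path.toList x.1.toList = false := by
        rwa [pvM, PySem.Str.startswith_eq] at hx'
      have hstep : pvStep path none x = none := by simp [pvStep, hxc]
      rw [hf] at h ⊢
      rw [List.foldl_cons, hstep]
      exact ih h

lemma pv_items_eq : pvENDPOINT_CATEGORIES.items = pvItems := by decide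

theorem get_rate_limit_for_path_spec : Claim_equal_get_rate_limit_for_path := by
  intro path method _
  unfold Spec_get_rate_limit_for_path get_rate_limit_for_path get_rate_limit_for_path_alt
  rw [pv_items_eq]
  have hle := pv_filter_le_one path
  rw [pv_fold_eq path pvItems hle]
  -- the sorted scan also returns the unique match (if any)
  have hperm : ((PySem.List.sorted pvItems (fun x => -(PySem.Str.len x.1))).filter
      (fun pl => PySem.Str.startswith path pl.1)).Perm (pvItems.filter (pvM path)) :=
    List.Perm.filter _ (PySem.List.sorted_perm pvItems (fun x => -(PySem.Str.len x.1)) false)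
  have hfind : (PySem.List.sorted pvItems (fun x => -(PySem.Str.len x.1))).find?
      (fun pl => PySem.Str.startswith path pl.1) = (pvItems.filter (pvM path)).head? := by
    rw [← List.head?_filter]
    cases hF : pvItems.filter (pvM path) with
    | nil =>
      rw [hF] at hperm
      rw [List.Perm.eq_nil hperm]
    | cons z t =>
      cases t with
      | nil =>
        rw [hF] at hperm
        rw [List.Perm.eq_singleton hperm]
      | cons w t' =>
        rw [hF] at hle
        simp at hle
  cases hget : pvENDPOINT_CATEGORIES.get? path with
  | some v =>
    -- exact match: (path, v) is the unique matching item
    have hmem : (path, v) ∈ pvItems := by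
      have := PySem.Dict.mem_items_of_get?_eq_some pvENDPOINT_CATEGORIES hget
      rwa [pv_items_eq] at this
    have hm : pvM path (path, v) = true := by
      rw [pvM, PySem.Str.startswith_eq]
      exact (PySem.Chars.startswith_iff _ _).mpr (List.prefix_refl _)
    have hmemF : (path, v) ∈ pvItems.filter (pvM path) := List.mem_filter.mpr ⟨hmem, hm⟩
    cases hF : pvItems.filter (pvM path) with
    | nil =>
      rw [hF] at hmemF
      simp at hmemF
    | cons z t =>
      cases t with
      | nil =>
        rw [hF] at hmemF
        have hz : (path, v) = z := by simpa using hmemF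
        rw [← hz]
        rfl
      | cons w t' =>
        rw [hF] at hle
        simp at hle
  | none =>
    rw [hfind]
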